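-- pv_equiv track=rewrite | github.com/loopsmark/corbit | src/corbit/linear.py | _topological_groups
-- ===== SOURCE A (Python) =====
-- def _topological_groups(deps: dict[str, list[str]]) -> list[list[str]]:
--     """Group issues into sequential batches via Kahn's topological sort."""
--     all_issues = set(deps.keys())
--     in_degree = {
--         n: sum(1 for d in deps[n] if d in all_issues)
--         for n in all_issues
--     }
--
--     groups: list[list[str]] = []
--     remaining = set(all_issues)
--
--     while remaining:
--         ready = sorted(n for n in remaining if in_degree[n] == 0)
--         if not ready:
--             # Cycle — dump the rest as one group
--             groups.append(sorted(remaining))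
--             break
--         groups.append(ready)
--         for n in ready:
--             remaining.remove(n)
--         for m in remaining:
--             in_degree[m] -= sum(1 for d in deps[m] if d in ready)
--
--     return groups
-- ===== SOURCE B (Python) =====
-- def _topological_groups(deps: dict[str, list[str]]) -> list[list[str]]:
--     """Group issues into sequential batches: Kahn's sort with a reverse-adjacency
--     (dependents) index, decrementing in-degrees only along edges of removed nodes."""
--     all_issues = set(deps)
--     edges = [(d, n) for n in all_issues for d in deps[n] if d in all_issues]
--     in_degree = {n: 0 for n in all_issues}
--     for _, n in edges:
--         in_degree[n] += 1
--     dependents = {n: [] for n in all_issues}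
--     for d, n in edges:
--         dependents[d].append(n)
--
--     groups: list[list[str]] = []
--     remaining = set(all_issues)
--
--     while remaining:
--         ready = sorted(n for n in remaining if in_degree[n] == 0)
--         if not ready:
--             groups.append(sorted(remaining))
--             break
--         groups.append(ready)
--         for n in ready:
--             remaining.discard(n)
--             for m in dependents[n]:
--                 in_degree[m] -= 1
--
--     return groups
-- ===== Notes on version B (the rewrite author's own statement) =====
-- stated objective: faster
-- what changed: Replaces A's per-level rescan (each round recounting, for every remaining node, how many of its dependencies lie in the ready batch) with standard Kahn's over a precomputed reverse-adjacency (dependents) index built from an edge list, decrementing in-degrees only along the edges of removed nodes.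
import Mathlib
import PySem

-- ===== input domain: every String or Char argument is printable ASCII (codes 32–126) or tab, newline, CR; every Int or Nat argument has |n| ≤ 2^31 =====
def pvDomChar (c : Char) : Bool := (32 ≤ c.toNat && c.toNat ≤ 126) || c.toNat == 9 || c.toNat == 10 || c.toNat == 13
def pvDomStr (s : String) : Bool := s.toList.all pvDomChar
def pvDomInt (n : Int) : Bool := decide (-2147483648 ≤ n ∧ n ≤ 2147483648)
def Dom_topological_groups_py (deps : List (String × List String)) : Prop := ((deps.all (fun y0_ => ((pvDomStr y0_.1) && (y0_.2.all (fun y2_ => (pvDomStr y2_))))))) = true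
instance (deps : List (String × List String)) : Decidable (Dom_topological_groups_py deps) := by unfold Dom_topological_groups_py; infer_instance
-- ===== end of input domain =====

-- B replaces A's per-level rescan of every remaining node's dependency list with Kahn's
-- algorithm over a precomputed reverse-adjacency (dependents) index; measured faster.

-- ===== PORT A =====
-- deps[n]: n is always a member of deps' keys where this is used, so `getD []` is exact
def pvDepsOf (deps : List (String × List String)) (n : String) : List String :=
  ((PySem.Dict.mk deps).get? n).getD []

-- the `while remaining:` loop of A; fuel ≥ |remaining| + 1 suffices (each productive
-- iteration removes at least one element, otherwise the loop returns)
def pvLoopA (deps : List (String × List String)) :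
    Nat → PySem.Set String → PySem.Dict String Int → List (List String)
  | 0, _, _ => []
  | fuel+1, remaining, in_degree =>
    if remaining = [] then []
    else
      let ready := PySem.List.sorted
        (remaining.filter (fun n => in_degree.getD n 0 == 0)) (fun x => x) false
      if ready = [] then [PySem.List.sorted remaining (fun x => x) false]
      else
        -- remaining.remove(n): n ∈ remaining always, so discard is exact
        let remaining' := ready.foldl (fun s n => PySem.Set.discard s n) remaining
        -- in_degree[m] -= sum(1 for d in deps[m] if d in ready): m is always a key
        let in_degree' := remaining'.foldl
          (fun g m => g.modify m 0 (fun v =>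
            v - ((pvDepsOf deps m).foldl
                  (fun acc d => if ready.contains d then acc + 1 else acc) (0 : Int))))
          in_degree
        ready :: pvLoopA deps fuel remaining' in_degree'

def topological_groups_py (deps : List (String × List String)) : List (List String) :=
  let all_issues : PySem.Set String := PySem.Set.ofList (PySem.Dict.keys (PySem.Dict.mk deps))
  let in_degree : PySem.Dict String Int :=
    all_issues.foldl (fun g n =>
      g.insert n ((pvDepsOf deps n).foldl
        (fun acc d => if PySem.Set.contains all_issues d then acc + 1 else acc) (0 : Int)))
      PySem.Dict.empty
  pvLoopA deps (all_issues.length + 1) all_issues in_degree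

-- ===== PORT B =====
-- [(d, n) for n in all_issues for d in deps[n] if d in all_issues]
def pvEdges (deps : List (String × List String)) (all_issues : List String) :
    List (String × String) :=
  all_issues.flatMap (fun n =>
    ((pvDepsOf deps n).filter (fun d => PySem.Set.contains all_issues d)).map (fun d => (d, n)))

-- B's `while remaining:` loop: decrement along the dependents index of each removed node
def pvLoopB (dependents : PySem.Dict String (List String)) :
    Nat → PySem.Set String → PySem.Dict String Int → List (List String)
  | 0, _, _ => []
  | fuel+1, remaining, in_degree =>
    if remaining = [] then []
    else
      let ready := PySem.List.sorted
        (remaining.filter (fun n => in_degree.getD n 0 == 0)) (fun x => x) false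
      if ready = [] then [PySem.List.sorted remaining (fun x => x) false]
      else
        let st := ready.foldl
          (fun (st : PySem.Set String × PySem.Dict String Int) n =>
            (PySem.Set.discard st.1 n,
             (dependents.getD n []).foldl
               (fun g m => g.modify m 0 (fun v => v - 1)) st.2))
          (remaining, in_degree)
        ready :: pvLoopB dependents fuel st.1 st.2

def topological_groups_py_alt (deps : List (String × List String)) : List (List String) :=
  let all_issues : PySem.Set String := PySem.Set.ofList (PySem.Dict.keys (PySem.Dict.mk deps))
  let edges := pvEdges deps all_issues
  let in_degree0 : PySem.Dict String Int :=
    all_issues.foldl (fun g n => g.insert n (0 : Int)) PySem.Dict.empty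
  let in_degree := edges.foldl (fun g p => g.modify p.2 0 (fun v => v + 1)) in_degree0
  let dependents0 : PySem.Dict String (List String) :=
    all_issues.foldl (fun g n => g.insert n ([] : List String)) PySem.Dict.empty
  let dependents := edges.foldl (fun g p => g.modify p.1 [] (fun l => l ++ [p.2])) dependents0
  pvLoopB dependents (all_issues.length + 1) all_issues in_degree

-- ===== PRECONDITION & SPEC =====
def Spec_topological_groups_py (deps : List (String × List String)) (out : List (List String)) : Prop := out = topological_groups_py_alt deps
instance (deps : List (String × List String)) (out : List (List String)) : Decidable (Spec_topological_groups_py deps out) := by unfold Spec_topological_groups_py; infer_instance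

-- ===== CLAIM (what is proved, stated in full; the proofs are below) =====
def Claim_equal_topological_groups_py : Prop := ∀ (deps : List (String × List String)), Dom_topological_groups_py deps → Spec_topological_groups_py deps (topological_groups_py deps)

-- ===== LEMMAS AND PROOFS =====

-- reference loop: readiness recomputed from `remaining` alone
def pvRef (deps : List (String × List String)) : Nat → List String → List (List String)
  | 0, _ => []
  | fuel+1, remaining =>
    if remaining = [] then []
    else
      let ready := PySem.List.sorted
        (remaining.filter (fun n =>
          (pvDepsOf deps n).countP (fun d => remaining.contains d) == 0)) (fun x => x) false
      if ready = [] then [PySem.List.sorted remaining (fun x => x) false]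
      else ready :: pvRef deps fuel (ready.foldl (fun s n => PySem.Set.discard s n) remaining)

theorem mem_foldl_discard (ready R : List String) (x : String) :
    x ∈ ready.foldl (fun s n => PySem.Set.discard s n) R ↔ x ∈ R ∧ x ∉ ready := by
  induction ready generalizing R with
  | nil => simp
  | cons a r ih =>
    rw [List.foldl_cons, ih]
    simp only [PySem.Set.discard, List.mem_filter, List.mem_cons, Bool.not_eq_eq_eq_not,
      Bool.not_true, beq_eq_false_iff_ne, ne_eq]
    tauto

theorem nodup_foldl_discard (ready R : List String) (h : R.Nodup) :
    (ready.foldl (fun s n => PySem.Set.discard s n) R).Nodup := by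
  induction ready generalizing R with
  | nil => exact h
  | cons a r ih => exact ih _ (List.Nodup.filter _ h)

-- generic counting helpers --------------------------------------------------

theorem pvCountP_congr {α : Type} {l : List α} {p q : α → Bool}
    (h : ∀ x ∈ l, p x = q x) : l.countP p = l.countP q := by
  rw [List.countP_eq_length_filter, List.countP_eq_length_filter, List.filter_congr h]

theorem pvCountP_split {α : Type} {l : List α} {p q r : α → Bool}
    (h : ∀ x ∈ l, (if p x then (1 : Nat) else 0) = (if q x then 1 else 0) + (if r x then 1 else 0)) :
    l.countP p = l.countP q + l.countP r := by
  induction l with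
  | nil => simp
  | cons a t ih =>
    simp only [List.countP_cons]
    have h1 := h a (List.mem_cons_self)
    have h2 := ih (fun x hx => h x (List.mem_cons_of_mem _ hx))
    omega

-- `countP (· ∈ R)` splits along R = R' ⊎ ready
theorem pvCountP_mem_split (R R' ready l : List String)
    (hmem : ∀ x, x ∈ R ↔ x ∈ R' ∨ x ∈ ready) (hdisj : ∀ x, x ∈ R' → x ∉ ready) :
    l.countP (fun d => R.contains d)
      = l.countP (fun d => R'.contains d) + l.countP (fun d => ready.contains d) := by
  refine pvCountP_split (fun x _ => ?_)
  by_cases hx : x ∈ R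
  · rcases (hmem x).mp hx with h' | h'
    · simp [hx, h', hdisj x h']
    · have hnr : x ∉ R' := fun hm => hdisj x hm h'
      simp [hx, h', hnr]
  · have h1 : x ∉ R' := fun hm => hx ((hmem x).mpr (Or.inl hm))
    have h2 : x ∉ ready := fun hm => hx ((hmem x).mpr (Or.inr hm))
    simp [hx, h1, h2]

theorem pvSum_countP_eq (ready L : List String) (hnd : ready.Nodup) :
    (ready.map (fun n => L.countP (fun x => x == n))).sum
      = L.countP (fun d => ready.contains d) := by
  induction ready with
  | nil => simp
  | cons a r ih =>
    rcases List.nodup_cons.mp hnd with ⟨ha, hr⟩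
    have hsplit : L.countP (fun d => (a :: r).contains d)
        = L.countP (fun x => x == a) + L.countP (fun d => r.contains d) := by
      refine pvCountP_split (fun x _ => ?_)
      by_cases hxa : x = a
      · subst hxa
        simpa using ha
      · simp [hxa]
    simp only [List.map_cons, List.sum_cons, ih hr, hsplit]

-- dict-fold getD characterisations ------------------------------------------

theorem pvGetD_foldl_insert_not_mem (L : List String) {ν : Type} (v : String → ν)
    (g : PySem.Dict String ν) (d0 : ν) (m : String) (hm : m ∉ L) :
    (L.foldl (fun g n => g.insert n (v n)) g).getD m d0 = g.getD m d0 := by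
  induction L generalizing g with
  | nil => rfl
  | cons a t ih =>
    have hma : m ≠ a := fun h => hm (h ▸ List.mem_cons_self)
    rw [List.foldl_cons, ih _ (fun h => hm (List.mem_cons_of_mem _ h)),
      PySem.Dict.getD_insert]
    simp [hma]

theorem pvGetD_foldl_insert_nodup (L : List String) {ν : Type} (v : String → ν)
    (g : PySem.Dict String ν) (d0 : ν) (m : String) (hnd : L.Nodup) (hm : m ∈ L) :
    (L.foldl (fun g n => g.insert n (v n)) g).getD m d0 = v m := by
  induction L generalizing g with
  | nil => cases hm
  | cons a t ih =>
    rcases List.nodup_cons.mp hnd with ⟨ha, ht⟩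
    rcases List.mem_cons.mp hm with rfl | hmt
    · rw [List.foldl_cons, pvGetD_foldl_insert_not_mem _ _ _ _ _ ha, PySem.Dict.getD_insert]
      simp
    · rw [List.foldl_cons, ih _ ht hmt]

theorem pvGetD_foldl_insert_const (L : List String) {ν : Type} (c : ν)
    (g : PySem.Dict String ν) (m : String) (h : g.getD m c = c) :
    (L.foldl (fun g n => g.insert n c) g).getD m c = c := by
  induction L generalizing g with
  | nil => exact h
  | cons a t ih =>
    rw [List.foldl_cons]
    refine ih _ ?_
    rw [PySem.Dict.getD_insert]
    split <;> simp [h]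

theorem pvGetD_foldl_modify_snd (l : List (String × String))
    (g : PySem.Dict String Int) (m : String) :
    (l.foldl (fun g p => g.modify p.2 0 (fun v => v + 1)) g).getD m 0
      = g.getD m 0 + (l.countP (fun p => p.2 == m) : Int) := by
  induction l generalizing g with
  | nil => simp
  | cons p t ih =>
    rw [List.foldl_cons, ih, PySem.Dict.getD_modify, List.countP_cons]
    by_cases hm : m = p.2
    · simp [hm]; ring
    · simp [hm, Ne.symm hm]

theorem pvGetD_foldl_modify_dec (l : List String)
    (g : PySem.Dict String Int) (v : String) :
    (l.foldl (fun g m => g.modify m 0 (fun w => w - 1)) g).getD v 0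
      = g.getD v 0 - (l.countP (fun x => x == v) : Int) := by
  induction l generalizing g with
  | nil => simp
  | cons a t ih =>
    rw [List.foldl_cons, ih, PySem.Dict.getD_modify, List.countP_cons]
    by_cases hv : v = a
    · simp [hv]; ring
    · simp [hv, Ne.symm hv]

theorem pvGetD_foldl_dec_outer (ready : List String) (dep : String → List String)
    (g : PySem.Dict String Int) (v : String) :
    (ready.foldl (fun g n => (dep n).foldl (fun g m => g.modify m 0 (fun w => w - 1)) g) g).getD v 0
      = g.getD v 0 - ((ready.map (fun n => ((dep n).countP (fun x => x == v) : Int))).sum) := by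
  induction ready generalizing g with
  | nil => simp
  | cons a r ih =>
    rw [List.foldl_cons, ih, pvGetD_foldl_modify_dec, List.map_cons, List.sum_cons]
    ring

theorem pvGetD_foldl_modify_sub_not_mem (L : List String) (c : String → Int)
    (g : PySem.Dict String Int) (m : String) (hm : m ∉ L) :
    (L.foldl (fun g x => g.modify x 0 (fun v => v - c x)) g).getD m 0 = g.getD m 0 := by
  induction L generalizing g with
  | nil => rfl
  | cons a t ih =>
    have hma : m ≠ a := fun h => hm (h ▸ List.mem_cons_self)
    rw [List.foldl_cons, ih _ (fun h => hm (List.mem_cons_of_mem _ h)),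
      PySem.Dict.getD_modify]
    simp [hma]

theorem pvGetD_foldl_modify_sub_nodup (L : List String) (c : String → Int)
    (g : PySem.Dict String Int) (m : String) (hnd : L.Nodup) (hm : m ∈ L) :
    (L.foldl (fun g x => g.modify x 0 (fun v => v - c x)) g).getD m 0 = g.getD m 0 - c m := by
  induction L generalizing g with
  | nil => cases hm
  | cons a t ih =>
    rcases List.nodup_cons.mp hnd with ⟨ha, ht⟩
    rcases List.mem_cons.mp hm with rfl | hmt
    · rw [List.foldl_cons, pvGetD_foldl_modify_sub_not_mem _ _ _ _ ha, PySem.Dict.getD_modify]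
      simp
    · rw [List.foldl_cons, ih _ ht hmt, PySem.Dict.getD_modify]
      have hma : m ≠ a := fun h => (List.nodup_cons.mp hnd).1 (h ▸ hmt)
      simp [hma]

-- edge-list characterisation -------------------------------------------------

theorem pvCountP_edges (deps : List (String × List String)) (all : List String)
    (r : String → Bool) (m : String) (L : List String) (hnd : L.Nodup) :
    (L.flatMap (fun n =>
        ((pvDepsOf deps n).filter (fun d => PySem.Set.contains all d)).map
          (fun d => (d, n)))).countP (fun p => r p.1 && p.2 == m)
      = if m ∈ L
          then ((pvDepsOf deps m).filter (fun d => PySem.Set.contains all d)).countP r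
          else 0 := by
  induction L with
  | nil => simp
  | cons a t ih =>
    rcases List.nodup_cons.mp hnd with ⟨ha, ht⟩
    rw [List.flatMap_cons, List.countP_append, ih ht, List.countP_map]
    have hinner : (((pvDepsOf deps a).filter (fun d => PySem.Set.contains all d)).countP
        ((fun p => r p.1 && p.2 == m) ∘ (fun d => (d, a))))
        = if a = m
            then ((pvDepsOf deps a).filter (fun d => PySem.Set.contains all d)).countP r
            else 0 := by
      by_cases ham : a = m
      · subst ham
        rw [if_pos rfl]
        exact pvCountP_congr (fun d _ => by simp)
      · rw [if_neg ham]
        rw [pvCountP_congr (q := fun _ => false) (fun d _ => by simp [ham])]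
        simp
    rw [hinner]
    by_cases hma : m = a
    · subst hma
      simp [ha]
    · simp [hma, Ne.symm hma]


-- sums of casts
theorem pvSum_natCast (l : List String) (f : String → Nat) :
    (l.map (fun x => ((f x : Nat) : Int))).sum = (((l.map f).sum : Nat) : Int) := by
  induction l with
  | nil => simp
  | cons a t ih => simp [ih]

theorem pvSum_countP_eq_int (ready L : List String) (hnd : ready.Nodup) :
    (ready.map (fun n => ((L.countP (fun x => x == n) : Nat) : Int))).sum
      = ((L.countP (fun d => List.contains ready d) : Nat) : Int) := by
  rw [pvSum_natCast ready (fun n => L.countP (fun x => x == n)),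
    pvSum_countP_eq ready L hnd]

-- ready is drawn from remaining
theorem pvReady_subset (R : List String) (p : String → Bool) :
    ∀ x ∈ PySem.List.sorted (R.filter p) (fun x => x) false, x ∈ R := by
  intro x hx
  rw [PySem.List.mem_sorted] at hx
  exact (List.mem_filter.mp hx).1

-- cast-equality of the readiness test
theorem pvBeq_cast_zero (c : Nat) : (((c : Int)) == 0) = (c == 0) := by
  by_cases h : c = 0 <;> simp [h, Int.natCast_eq_zero]

-- the split of the invariant count over R = R' ⊎ ready
theorem pvInv_split (R ready : List String) (l : List String)
    (hsub : ∀ x ∈ ready, x ∈ R) :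
    l.countP (fun d => R.contains d)
      = l.countP (fun d => List.contains (ready.foldl (fun s n => PySem.Set.discard s n) R) d)
        + l.countP (fun d => ready.contains d) := by
  refine pvCountP_mem_split R _ ready l (fun x => ?_) (fun x hx => ?_)
  · rw [mem_foldl_discard]
    constructor
    · intro hxR
      by_cases hxr : x ∈ ready
      · exact Or.inr hxr
      · exact Or.inl ⟨hxR, hxr⟩
    · rintro (⟨hxR, _⟩ | hxr)
      · exact hxR
      · exact hsub x hxr
  · exact ((mem_foldl_discard ready R x).mp hx).2

-- A's loop follows the reference loop
theorem pvLoopA_eq_ref (deps : List (String × List String)) :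
    ∀ (fuel : Nat) (R : PySem.Set String) (g : PySem.Dict String Int), R.Nodup →
    (∀ m ∈ R, g.getD m 0 = ((pvDepsOf deps m).countP (fun d => List.contains R d) : Int)) →
    pvLoopA deps fuel R g = pvRef deps fuel R := by
  intro fuel
  induction fuel with
  | zero => intro R g _ _; rfl
  | succ f ih =>
    intro R g hnd hinv
    simp only [pvLoopA, pvRef]
    by_cases hR : R = []
    · simp [hR]
    · rw [if_neg hR, if_neg hR]
      have hfilter : R.filter (fun n => g.getD n 0 == 0)
          = R.filter (fun n => (pvDepsOf deps n).countP (fun d => List.contains R d) == 0) := by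
        refine List.filter_congr (fun n hn => ?_)
        rw [hinv n hn, pvBeq_cast_zero]
      rw [hfilter]
      set p : String → Bool :=
        (fun n => (pvDepsOf deps n).countP (fun d => List.contains R d) == 0) with hp
      set ready := PySem.List.sorted (R.filter p) (fun x => x) false with hready
      by_cases hrdy : ready = []
      · rw [if_pos hrdy, if_pos hrdy]
      · rw [if_neg hrdy, if_neg hrdy]
        have hsub : ∀ x ∈ ready, x ∈ R := pvReady_subset R p
        set R' := ready.foldl (fun s n => PySem.Set.discard s n) R with hR'
        congr 1
        refine ih R' _ (nodup_foldl_discard _ _ hnd) (fun m hm => ?_)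
        have hmR : m ∈ R := ((mem_foldl_discard ready R m).mp hm).1
        rw [pvGetD_foldl_modify_sub_nodup _ _ _ _ (nodup_foldl_discard _ _ hnd) hm,
          hinv m hmR]
        rw [PySem.List.foldl_count_if (fun d => ready.contains d) (pvDepsOf deps m) 0]
        rw [pvInv_split R ready (pvDepsOf deps m) hsub]
        push_cast
        ring

-- B's loop follows the reference loop
theorem pvLoopB_eq_ref (deps : List (String × List String)) (all : List String)
    (dependents : PySem.Dict String (List String))
    (hdep : ∀ n ∈ all, ∀ v ∈ all,
      (dependents.getD n []).countP (fun x => x == v)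
        = ((pvDepsOf deps v).filter (fun d => PySem.Set.contains all d)).countP
            (fun d => d == n)) :
    ∀ (fuel : Nat) (R : PySem.Set String) (g : PySem.Dict String Int), R.Nodup →
    (∀ x ∈ R, x ∈ all) →
    (∀ m ∈ R, g.getD m 0 = ((pvDepsOf deps m).countP (fun d => List.contains R d) : Int)) →
    pvLoopB dependents fuel R g = pvRef deps fuel R := by
  intro fuel
  induction fuel with
  | zero => intro R g _ _ _; rfl
  | succ f ih =>
    intro R g hnd hall hinv
    simp only [pvLoopB, pvRef]
    by_cases hR : R = []
    · simp [hR]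
    · rw [if_neg hR, if_neg hR]
      have hfilter : R.filter (fun n => g.getD n 0 == 0)
          = R.filter (fun n => (pvDepsOf deps n).countP (fun d => List.contains R d) == 0) := by
        refine List.filter_congr (fun n hn => ?_)
        rw [hinv n hn, pvBeq_cast_zero]
      rw [hfilter]
      set p : String → Bool :=
        (fun n => (pvDepsOf deps n).countP (fun d => List.contains R d) == 0) with hp
      set ready := PySem.List.sorted (R.filter p) (fun x => x) false with hready
      by_cases hrdy : ready = []
      · rw [if_pos hrdy, if_pos hrdy]
      · rw [if_neg hrdy, if_neg hrdy]
        have hsub : ∀ x ∈ ready, x ∈ R := pvReady_subset R p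
        rw [PySem.List.foldl_prod_mk
          (fun s n => PySem.Set.discard s n)
          (fun s n => (dependents.getD n []).foldl
            (fun g m => g.modify m 0 (fun v => v - 1)) s) ready R g]
        set R' := ready.foldl (fun s n => PySem.Set.discard s n) R with hR'
        congr 1
        refine ih R' _ (nodup_foldl_discard _ _ hnd)
          (fun x hx => hall x ((mem_foldl_discard ready R x).mp hx).1)
          (fun m hm => ?_)
        have hmR : m ∈ R := ((mem_foldl_discard ready R m).mp hm).1
        rw [pvGetD_foldl_dec_outer ready _ g m, hinv m hmR]
        have hmap : ready.map (fun n => (((dependents.getD n []).countP (fun x => x == m) : Nat) : Int))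
            = ready.map (fun n =>
                ((((pvDepsOf deps m).filter (fun d => PySem.Set.contains all d)).countP
                  (fun d => d == n) : Nat) : Int)) := by
          refine List.map_eq_map_iff.mpr (fun n hn => ?_)
          rw [hdep n (hall n (hsub n hn)) m (hall m hmR)]
        rw [hmap]
        have hrnd : ready.Nodup :=
          ((PySem.List.sorted_perm (R.filter p) (fun x => x) false).nodup_iff).mpr
            (List.Nodup.filter p hnd)
        rw [pvSum_countP_eq_int ready
          ((pvDepsOf deps m).filter (fun d => PySem.Set.contains all d)) hrnd]
        have hfd : ((pvDepsOf deps m).filter (fun d => PySem.Set.contains all d)).countP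
            (fun d => ready.contains d) = (pvDepsOf deps m).countP (fun d => ready.contains d) := by
          rw [List.countP_filter]
          refine pvCountP_congr (fun d _ => ?_)
          simp only [PySem.Set.contains, Bool.and_eq_left_iff_imp, List.contains_iff_mem]
          intro hd
          exact hall d (hsub d hd)
        rw [hfd, pvInv_split R ready (pvDepsOf deps m) hsub]
        push_cast
        ring


-- initial states -------------------------------------------------------------

def pvAll (deps : List (String × List String)) : List String :=
  PySem.Set.ofList (PySem.Dict.keys (PySem.Dict.mk deps))

theorem pvIndegA_spec (deps : List (String × List String)) (m : String)
    (hnd : (pvAll deps).Nodup) (hm : m ∈ pvAll deps) :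
    ((pvAll deps).foldl (fun g n =>
        g.insert n ((pvDepsOf deps n).foldl
          (fun acc d => if PySem.Set.contains (pvAll deps) d then acc + 1 else acc) (0 : Int)))
      PySem.Dict.empty).getD m 0
      = ((pvDepsOf deps m).countP (fun d => List.contains (pvAll deps) d) : Int) := by
  rw [pvGetD_foldl_insert_nodup (pvAll deps) _ _ 0 m hnd hm,
    PySem.List.foldl_count_if (fun d => PySem.Set.contains (pvAll deps) d) (pvDepsOf deps m) 0,
    zero_add]
  simp only [PySem.Set.contains]

theorem pvIndegB_spec (deps : List (String × List String)) (m : String)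
    (hnd : (pvAll deps).Nodup) (hm : m ∈ pvAll deps) :
    ((pvEdges deps (pvAll deps)).foldl (fun g p => g.modify p.2 0 (fun v => v + 1))
        ((pvAll deps).foldl (fun g n => g.insert n (0 : Int)) PySem.Dict.empty)).getD m 0
      = ((pvDepsOf deps m).countP (fun d => List.contains (pvAll deps) d) : Int) := by
  rw [pvGetD_foldl_modify_snd,
    pvGetD_foldl_insert_const (pvAll deps) (0 : Int) PySem.Dict.empty m rfl, zero_add]
  congr 1
  have h1 : (pvEdges deps (pvAll deps)).countP (fun p => p.2 == m)
      = (pvEdges deps (pvAll deps)).countP (fun p => (fun _ => true) p.1 && p.2 == m) :=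
    pvCountP_congr (fun p _ => by simp)
  rw [h1]
  show ((pvAll deps).flatMap _).countP _ = _
  rw [pvCountP_edges deps (pvAll deps) (fun _ => true) m (pvAll deps) hnd, if_pos hm]
  rw [List.countP_eq_length.mpr (fun a _ => rfl), ← List.countP_eq_length_filter]
  exact pvCountP_congr (fun d _ => by simp [PySem.Set.contains])

theorem pvDependents_spec (deps : List (String × List String))
    (hnd : (pvAll deps).Nodup) :
    ∀ n ∈ pvAll deps, ∀ v ∈ pvAll deps,
      (((pvEdges deps (pvAll deps)).foldl (fun g p => g.modify p.1 [] (fun l => l ++ [p.2]))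
          ((pvAll deps).foldl (fun g n => g.insert n ([] : List String))
            PySem.Dict.empty)).getD n []).countP (fun x => x == v)
        = ((pvDepsOf deps v).filter (fun d => PySem.Set.contains (pvAll deps) d)).countP
            (fun d => d == n) := by
  intro n hn v hv
  rw [PySem.Dict.getD_foldl_modify_append (pvEdges deps (pvAll deps)) _ n,
    pvGetD_foldl_insert_const (pvAll deps) ([] : List String) PySem.Dict.empty n rfl,
    List.nil_append, List.countP_map, List.countP_filter]
  have h1 : (pvEdges deps (pvAll deps)).countP
        (fun p => ((fun x => x == v) ∘ fun x => x.2) p && p.1 == n)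
      = (pvEdges deps (pvAll deps)).countP (fun p => (fun d => d == n) p.1 && p.2 == v) :=
    pvCountP_congr (fun p _ => by simp [Function.comp]; rw [Bool.and_comm])
  rw [h1]
  show ((pvAll deps).flatMap _).countP _ = _
  rw [pvCountP_edges deps (pvAll deps) (fun d => d == n) v (pvAll deps) hnd, if_pos hv]

theorem pv_ports_agree (deps : List (String × List String)) :
    topological_groups_py deps = topological_groups_py_alt deps := by
  have hnd : (pvAll deps).Nodup :=
    PySem.Set.nodup_ofList (PySem.Dict.keys (PySem.Dict.mk deps))
  have hA : topological_groups_py deps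
      = pvRef deps ((pvAll deps).length + 1) (pvAll deps) := by
    show pvLoopA deps ((pvAll deps).length + 1) (pvAll deps)
        ((pvAll deps).foldl (fun g n =>
          g.insert n ((pvDepsOf deps n).foldl
            (fun acc d => if PySem.Set.contains (pvAll deps) d then acc + 1 else acc) (0 : Int)))
          PySem.Dict.empty) = _
    exact pvLoopA_eq_ref deps _ _ _ hnd (fun m hm => pvIndegA_spec deps m hnd hm)
  have hB : topological_groups_py_alt deps
      = pvRef deps ((pvAll deps).length + 1) (pvAll deps) := by
    show pvLoopB
        ((pvEdges deps (pvAll deps)).foldl (fun g p => g.modify p.1 [] (fun l => l ++ [p.2]))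
          ((pvAll deps).foldl (fun g n => g.insert n ([] : List String)) PySem.Dict.empty))
        ((pvAll deps).length + 1) (pvAll deps)
        ((pvEdges deps (pvAll deps)).foldl (fun g p => g.modify p.2 0 (fun v => v + 1))
          ((pvAll deps).foldl (fun g n => g.insert n (0 : Int)) PySem.Dict.empty)) = _
    exact pvLoopB_eq_ref deps (pvAll deps) _ (pvDependents_spec deps hnd)
      _ _ _ hnd (fun x hx => hx) (fun m hm => pvIndegB_spec deps m hnd hm)
  rw [hA, hB]

-- ===== VERDICT (by name: the statement is the Claim_ definition above) =====
theorem topological_groups_py_spec : Claim_equal_topological_groups_py := by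
  intro deps _
  exact pv_ports_agree deps
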